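-- pv_equiv track=rewrite | github.com/DAntyNoel/Information-Theorem-Bridge | counts_bull.py | point_distribution
-- ===== SOURCE A (Python) =====
-- import math
--
-- def combination(n, k):
--   # 如果n或k不是整数或者n小于k或者n或k小于0，则返回0
--   if not isinstance(n, int) or not isinstance(k, int) or n < k or n < 0 or k < 0:
--     return 0
--   # 否则返回n!/(k!*(n-k)!)，即C(n,k)
--   else:
--     return math.factorial(n) // (math.factorial(k) * math.factorial(n - k))
--
-- def point_distribution(min_point, max_point):
--   # 如果最小点或最大点不是整数或者最小点小于0或者最大点大于40或者最小点大于最大点，则返回0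
--   if not isinstance(min_point, int) or not isinstance(max_point, int) or min_point < 0 or max_point > 40 or min_point > max_point:
--     return 0
--   # 否则初始化一个变量count为0，用来记录可能的分布数量
--   else:
--     count = 0
--     # 遍历所有可能的A、K、Q、J、10的数量（分别记为a,k,q,j,t），每张牌对应4个点力
--     for a in range(5):
--       for k in range(5):
--         for q in range(5):
--           for j in range(5):
--             for t in range(5):
--               # 计算当前组合对应的总点力
--               point = a * 4 + k * 3 + q * 2 + j + t
--               # 如果总点力在给定范围内，则计算当前组合对应的分布数量，并累加到count中
--               if min_point <= point <= max_point:
--                 # 当前组合对应的分布数量等于从13张牌中选a+k+q+j+t张牌，并且从剩下的4-a张A中选a张A，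
--                 # 从剩下的4-k张K中选k张K，以此类推，最后相乘得到结果
--                 count += combination(13, a + k + q + j + t) * combination(4 - a, a) * combination(4 - k, k) * combination(4 - q, q) * combination(4 - j, j) * combination(4 - t, t)
--     # 返回count作为结果
--     return count
-- ===== SOURCE B (Python) =====
-- import math
--
-- def combination(n, k):
--     if not isinstance(n, int) or not isinstance(k, int) or n < k or n < 0 or k < 0:
--         return 0
--     return math.factorial(n) // (math.factorial(k) * math.factorial(n - k))
--
-- def point_distribution(min_point, max_point):
--     if not isinstance(min_point, int) or not isinstance(max_point, int) or min_point < 0 or max_point > 40 or min_point > max_point: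
--         return 0
--     # dp maps (cards, points) -> sum over honour-count choices of the product
--     # of per-type weights combination(4-n, n); built by convolving the five
--     # card types (A=4, K=3, Q=2, J=1, T=1) one at a time.
--     dp = {(0, 0): 1}
--     for value in (4, 3, 2, 1, 1):
--         ndp = {}
--         for (c, p), w in dp.items():
--             for n in range(5):
--                 wn = w * combination(4 - n, n)
--                 if wn:
--                     key = (c + n, p + n * value)
--                     ndp[key] = ndp.get(key, 0) + wn
--         dp = ndp
--     return sum(w * combination(13, c)
--                for (c, p), w in dp.items() if min_point <= p <= max_point)
-- ===== Notes on version B (the rewrite author's own statement) =====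
-- stated objective: alternative
-- what changed: Replaces the 5-deep nested loop over all 5^5 honour-count combinations by a dictionary-based convolution: the five card types are folded one at a time into a sparse dp table keyed by (cards, points), and a single final pass sums dp entries whose point total lies in [min_point, max_point], weighted by combination(13, cards).
import Mathlib
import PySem

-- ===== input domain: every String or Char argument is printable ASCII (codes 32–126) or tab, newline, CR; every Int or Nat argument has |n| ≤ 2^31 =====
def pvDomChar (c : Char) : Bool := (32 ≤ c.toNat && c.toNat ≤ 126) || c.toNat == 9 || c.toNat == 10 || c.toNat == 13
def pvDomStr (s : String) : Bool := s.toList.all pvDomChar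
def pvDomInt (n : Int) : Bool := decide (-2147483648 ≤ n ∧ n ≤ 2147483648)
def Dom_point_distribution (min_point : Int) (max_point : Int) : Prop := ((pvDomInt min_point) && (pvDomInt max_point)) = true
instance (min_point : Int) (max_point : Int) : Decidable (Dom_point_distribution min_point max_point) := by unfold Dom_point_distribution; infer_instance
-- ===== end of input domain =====

-- B replaces the 5-deep nested loop over 5^5 honour combinations by a dictionary
-- convolution over the five card types plus one final filtered pass (alternative
-- decomposition; the return value is proved identical on all inputs).

-- ===== PORT A =====
-- combination(n, k): the isinstance tests are always true for Int arguments.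
def combination (n k : Int) : Int :=
  if n < k ∨ n < 0 ∨ k < 0 then 0
  else PySem.Int.floordiv (Int.ofNat n.toNat.factorial)
        (Int.ofNat (k.toNat.factorial * (n - k).toNat.factorial))

def point_distribution (min_point : Int) (max_point : Int) : Int :=
  if min_point < 0 ∨ max_point > 40 ∨ min_point > max_point then 0
  else
    (PySem.List.pyRange 0 5 1).foldl (fun count a =>
      (PySem.List.pyRange 0 5 1).foldl (fun count k =>
        (PySem.List.pyRange 0 5 1).foldl (fun count q =>
          (PySem.List.pyRange 0 5 1).foldl (fun count j =>
            (PySem.List.pyRange 0 5 1).foldl (fun count t =>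
              if min_point ≤ a * 4 + k * 3 + q * 2 + j + t ∧
                  a * 4 + k * 3 + q * 2 + j + t ≤ max_point then
                count + combination 13 (a + k + q + j + t) * combination (4 - a) a *
                  combination (4 - k) k * combination (4 - q) q *
                  combination (4 - j) j * combination (4 - t) t
              else count) count) count) count) count) 0

-- ===== PORT B =====
def point_distribution_alt (min_point : Int) (max_point : Int) : Int :=
  if min_point < 0 ∨ max_point > 40 ∨ min_point > max_point then 0
  else
    let dp0 : PySem.Dict (Int × Int) Int := (PySem.Dict.empty).insert (0, 0) 1
    let dp := ([4, 3, 2, 1, 1] : List Int).foldl (fun dp value =>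
      dp.items.foldl (fun ndp cpw =>
        (PySem.List.pyRange 0 5 1).foldl (fun ndp n =>
          let wn := cpw.2 * combination (4 - n) n
          if wn ≠ 0 then
            ndp.insert (cpw.1.1 + n, cpw.1.2 + n * value)
              (ndp.getD (cpw.1.1 + n, cpw.1.2 + n * value) 0 + wn)
          else ndp) ndp) PySem.Dict.empty) dp0
    dp.items.foldl (fun s cpw =>
      if min_point ≤ cpw.1.2 ∧ cpw.1.2 ≤ max_point then
        s + cpw.2 * combination 13 cpw.1.1
      else s) 0

-- ===== PRECONDITION & SPEC =====
def Spec_point_distribution (min_point : Int) (max_point : Int) (out : Int) : Prop := out = point_distribution_alt min_point max_point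
instance (min_point : Int) (max_point : Int) (out : Int) : Decidable (Spec_point_distribution min_point max_point out) := by unfold Spec_point_distribution; infer_instance

-- ===== CLAIM (what is proved, stated in full; the proofs are below) =====
def Claim_equal_point_distribution : Prop := ∀ (min_point : Int) (max_point : Int), Dom_point_distribution min_point max_point → Spec_point_distribution min_point max_point (point_distribution min_point max_point)

-- ===== LEMMAS AND PROOFS =====
set_option maxRecDepth 100000
set_option maxHeartbeats 2000000

-- the per-tuple weight of A's loop body
def wA (a k q j t : Int) : Int :=
  combination 13 (a + k + q + j + t) * combination (4 - a) a *
    combination (4 - k) k * combination (4 - q) q *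
    combination (4 - j) j * combination (4 - t) t

-- A's loop as a closed list of (point, weight) pairs
def LA : List (Int × Int) :=
  (PySem.List.pyRange 0 5 1).flatMap (fun a =>
    (PySem.List.pyRange 0 5 1).flatMap (fun k =>
      (PySem.List.pyRange 0 5 1).flatMap (fun q =>
        (PySem.List.pyRange 0 5 1).flatMap (fun j =>
          (PySem.List.pyRange 0 5 1).map (fun t =>
            (a * 4 + k * 3 + q * 2 + j + t, wA a k q j t))))))

-- B's dp dictionary (the closed value of the let-bound dp in the port)
def dpB : PySem.Dict (Int × Int) Int :=
  ([4, 3, 2, 1, 1] : List Int).foldl (fun dp value =>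
    dp.items.foldl (fun ndp cpw =>
      (PySem.List.pyRange 0 5 1).foldl (fun ndp n =>
        let wn := cpw.2 * combination (4 - n) n
        if wn ≠ 0 then
          ndp.insert (cpw.1.1 + n, cpw.1.2 + n * value)
            (ndp.getD (cpw.1.1 + n, cpw.1.2 + n * value) 0 + wn)
        else ndp) ndp) PySem.Dict.empty) ((PySem.Dict.empty).insert (0, 0) 1)

-- B's final pass as a closed list of (point, weight) pairs
def LB : List (Int × Int) :=
  dpB.items.map (fun cpw => (cpw.1.2, cpw.2 * combination 13 cpw.1.1))

def ind (mn mx : Int) (pw : Int × Int) : Int :=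
  if mn ≤ pw.1 ∧ pw.1 ≤ mx then pw.2 else 0

-- total weight of point p in L
def G (L : List (Int × Int)) (p : Int) : Int :=
  ((L.filter (fun pw => pw.1 = p)).map (·.2)).sum

-- per-point aggregation in one pass over a list of (point, weight) pairs
def aggStep (acc : List Int) (pw : Int × Int) : List Int :=
  acc.set pw.1.toNat (acc.getD pw.1.toNat 0 + pw.2)

def agg (L : List (Int × Int)) : List Int :=
  L.foldl aggStep (List.replicate 45 0)

-- the aggregate tables after folding in a = 0, 1, 2, 3, 4 (computed once, checked by kernel)
def pvT0 : List Int := [1, 78, 897, 3159, 11635, 24726, 40118, 84942, 92807, 78507, 75790, 43758, 24024, 10296, 1287, 0, 0, 0, 0, 0, 0, 0, 0, 0, 0, 0, 0, 0, 0, 0, 0, 0, 0, 0, 0, 0, 0, 0, 0, 0, 0, 0, 0, 0, 0]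

def pvT1 : List Int := [1, 78, 897, 3159, 11674, 26130, 50258, 113958, 183755, 239382, 319891, 491634, 425568, 326898, 272844, 135135, 68211, 23166, 2145, 0, 0, 0, 0, 0, 0, 0, 0, 0, 0, 0, 0, 0, 0, 0, 0, 0, 0, 0, 0, 0, 0, 0, 0, 0, 0]

def pvT2 : List Int := [1, 78, 897, 3159, 11674, 26130, 50258, 113958, 183833, 241098, 328614, 513084, 483340, 414414, 397969, 332046, 215787, 132561, 84942, 35607, 16302, 4290, 286, 0, 0, 0, 0, 0, 0, 0, 0, 0, 0, 0, 0, 0, 0, 0, 0, 0, 0, 0, 0, 0, 0]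

def pvT3 : List Int := [1, 78, 897, 3159, 11674, 26130, 50258, 113958, 183833, 241098, 328614, 513084, 483340, 414414, 397969, 332046, 215787, 132561, 84942, 35607, 16302, 4290, 286, 0, 0, 0, 0, 0, 0, 0, 0, 0, 0, 0, 0, 0, 0, 0, 0, 0, 0, 0, 0, 0, 0]

def pvT4 : List Int := [1, 78, 897, 3159, 11674, 26130, 50258, 113958, 183833, 241098, 328614, 513084, 483340, 414414, 397969, 332046, 215787, 132561, 84942, 35607, 16302, 4290, 286, 0, 0, 0, 0, 0, 0, 0, 0, 0, 0, 0, 0, 0, 0, 0, 0, 0, 0, 0, 0, 0, 0]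


lemma ifpush (P : Prop) [Decidable P] (c w : Int) :
    (if P then c + w else c) = c + (if P then w else 0) := by
  split <;> simp

lemma G_cons (pw : Int × Int) (L : List (Int × Int)) (p : Int) :
    G (pw :: L) p = (if pw.1 = p then pw.2 else 0) + G L p := by
  simp [G, List.filter_cons]
  split <;> simp

lemma G_nil (p : Int) : G [] p = 0 := rfl

-- indicator sum over L = sum of fibers over Icc
lemma ind_sum (mn mx : Int) (L : List (Int × Int)) :
    (L.map (ind mn mx)).sum = ∑ p ∈ Finset.Icc mn mx, G L p := by
  induction L with
  | nil => simp [G_nil]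
  | cons pw L ih =>
    have h1 : (∑ p ∈ Finset.Icc mn mx, if pw.1 = p then pw.2 else 0)
        = if pw.1 ∈ Finset.Icc mn mx then pw.2 else 0 := by
      simp [eq_comm]
    simp only [List.map_cons, List.sum_cons, ih, G_cons, Finset.sum_add_distrib, h1]
    congr 1
    simp [ind, Finset.mem_Icc]

lemma sum_ind_congr (mn mx : Int) (L1 L2 : List (Int × Int))
    (h : ∀ p : Int, G L1 p = G L2 p) :
    (L1.map (ind mn mx)).sum = (L2.map (ind mn mx)).sum := by
  rw [ind_sum, ind_sum]
  exact Finset.sum_congr rfl (fun p _ => h p)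

-- bridge: the one-pass aggregate computes the fibers
lemma agg_step_getD (L : List (Int × Int)) (acc : List Int)
    (hlen : acc.length = 45)
    (hL : ∀ pw ∈ L, 0 ≤ pw.1 ∧ pw.1 < 45) (i : Nat) (hi : i < 45) :
    (L.foldl aggStep acc).getD i 0 = acc.getD i 0 + G L (i : Int) := by
  induction L generalizing acc with
  | nil => simp [G_nil]
  | cons pw L ih =>
    have hpw := hL pw (by simp)
    have hmem : ∀ q ∈ L, 0 ≤ q.1 ∧ q.1 < 45 := fun q hq => hL q (by simp [hq])
    simp only [List.foldl_cons]
    rw [ih (aggStep acc pw) (by simp [aggStep, hlen]) hmem, G_cons]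
    have hset : (aggStep acc pw).getD i 0
        = if pw.1.toNat = i then acc.getD i 0 + pw.2 else acc.getD i 0 := by
      unfold aggStep
      by_cases hie : pw.1.toNat = i
      · subst hie
        have hlt : pw.1.toNat < acc.length := by omega
        simp [List.getD, hlt]
      · simp [List.getD, List.getElem?_set_ne (by omega : pw.1.toNat ≠ i), hie]
    rw [hset]
    have heq : (pw.1 = (i : Int)) ↔ (pw.1.toNat = i) := by omega
    by_cases hc : pw.1.toNat = i
    · simp [heq.mpr hc]; ring
    · have hne : ¬ pw.1 = (i : Int) := fun h => hc (heq.mp h)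
      simp [hc, hne]

-- fold a five-element literal range step by step through precomputed tables
lemma sum_flatMap_int {α : Type} (l : List α) (f : α → List Int) :
    (l.flatMap f).sum = (l.map (fun x => (f x).sum)).sum := by
  induction l with
  | nil => simp
  | cons x l ih => simp [List.flatMap_cons, List.sum_append, ih]

lemma foldl_steps {α : Type} (f : α → Int → α) (i t0 t1 t2 t3 t4 : α)
    (h0 : f i 0 = t0) (h1 : f t0 1 = t1) (h2 : f t1 2 = t2)
    (h3 : f t2 3 = t3) (h4 : f t3 4 = t4) :
    List.foldl f i ([0, 1, 2, 3, 4] : List Int) = t4 := by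
  simp [List.foldl_cons, List.foldl_nil, h0, h1, h2, h3, h4]

lemma agg_LA_lit : agg LA = pvT4 := by
  simp only [agg, LA, List.foldl_flatMap, List.foldl_map]
  rw [show PySem.List.pyRange 0 5 1 = ([0, 1, 2, 3, 4] : List Int) from by decide]
  exact foldl_steps _ _ pvT0 pvT1 pvT2 pvT3 pvT4
    (by decide) (by decide) (by decide) (by decide) (by decide)

lemma agg_LB_lit : agg LB = pvT4 := by decide

lemma agg_eq : agg LA = agg LB := by rw [agg_LA_lit, agg_LB_lit]

lemma boundsA : ∀ pw ∈ LA, 0 ≤ pw.1 ∧ pw.1 < 45 := by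
  intro pw h
  simp only [LA, List.mem_flatMap, List.mem_map, PySem.List.mem_pyRange_one] at h
  obtain ⟨a, ⟨ha0, ha5⟩, k, ⟨hk0, hk5⟩, q, ⟨hq0, hq5⟩, j, ⟨hj0, hj5⟩, t, ⟨ht0, ht5⟩, rfl⟩ := h
  constructor <;> simp <;> omega

lemma boundsB : ∀ pw ∈ LB, 0 ≤ pw.1 ∧ pw.1 < 45 := by decide

lemma G_eq_of_out_of_range (L : List (Int × Int))
    (hL : ∀ pw ∈ L, 0 ≤ pw.1 ∧ pw.1 < 45) (p : Int)
    (hp : ¬ (0 ≤ p ∧ p < 45)) : G L p = 0 := by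
  have hnil : L.filter (fun pw => pw.1 = p) = [] := by
    apply List.filter_eq_nil_iff.mpr
    intro pw hpw
    have := hL pw hpw
    simp only [decide_eq_true_eq]
    intro h; exact hp (by omega)
  simp [G, hnil]

lemma fibers_eq : ∀ p : Int, G LA p = G LB p := by
  intro p
  by_cases hp : 0 ≤ p ∧ p < 45
  · have hi : p.toNat < 45 := by omega
    have hA := agg_step_getD LA (List.replicate 45 0) (by simp) boundsA p.toNat hi
    have hB := agg_step_getD LB (List.replicate 45 0) (by simp) boundsB p.toNat hi
    have hp' : ((p.toNat : Nat) : Int) = p := by omega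
    have hgd : (agg LA).getD p.toNat 0 = (agg LB).getD p.toNat 0 := by rw [agg_eq]
    rw [agg, agg] at hgd
    rw [hA, hB, hp'] at hgd
    omega
  · rw [G_eq_of_out_of_range LA boundsA p hp, G_eq_of_out_of_range LB boundsB p hp]

-- ===== VERDICT (by name: the statement is the Claim_ definition above) =====
theorem point_distribution_spec : Claim_equal_point_distribution := by
  intro mn mx _
  unfold Spec_point_distribution point_distribution point_distribution_alt
  split
  · rfl
  · -- collapse A's nested loop and B's final pass to indicator sums
    have hA : (PySem.List.pyRange 0 5 1).foldl (fun count a =>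
        (PySem.List.pyRange 0 5 1).foldl (fun count k =>
          (PySem.List.pyRange 0 5 1).foldl (fun count q =>
            (PySem.List.pyRange 0 5 1).foldl (fun count j =>
              (PySem.List.pyRange 0 5 1).foldl (fun count t =>
                if mn ≤ a * 4 + k * 3 + q * 2 + j + t ∧
                    a * 4 + k * 3 + q * 2 + j + t ≤ mx then
                  count + combination 13 (a + k + q + j + t) * combination (4 - a) a *
                    combination (4 - k) k * combination (4 - q) q *
                    combination (4 - j) j * combination (4 - t) t
                else count) count) count) count) count) 0
        = (LA.map (ind mn mx)).sum := by
      simp only [ifpush, PySem.List.foldl_add, zero_add, LA, List.map_flatMap,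
        List.map_map, sum_flatMap_int, Function.comp_def, ind, wA]
    have hB : dpB.items.foldl (fun s cpw =>
        if mn ≤ cpw.1.2 ∧ cpw.1.2 ≤ mx then
          s + cpw.2 * combination 13 cpw.1.1
        else s) 0 = (LB.map (ind mn mx)).sum := by
      simp only [ifpush, PySem.List.foldl_add, zero_add, LB, List.map_map,
        Function.comp_def, ind]
    rw [hA, sum_ind_congr mn mx LA LB fibers_eq, ← hB]
    rfl
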